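-- pv_equiv track=rewrite | github.com/llvmpass/llvm-passes | python/plotter.py | min_list_not_zero
-- ===== SOURCE A (Python) =====
-- def min_list_not_zero(numbers):
--     """
--     Returns the min value in the iterable numbers, excluding .
--     The idea is if we kept 0 values, computing a speedup would be impossible.
--     Raises exception if the list is empty
--     :param numbers: The list of numbers
--     :return: The min value in numbers that is different than 0. None if such number is not found
--     """
--     if len(numbers) == 0:
--         raise Exception("ReducedExecTimes::min_function called on empty list")
--
--     # We don't use the standard method which is min = number[0] then iterates on number[1:] because number[0] may
--     # be invalid
--     minimum = None
--
--     for e in numbers: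
--         if e == 0:
--             continue
--
--         if minimum is None:
--             minimum = e
--         elif e < minimum:
--             minimum = e
--
--     return minimum
-- ===== SOURCE B (Python) =====
-- def min_list_not_zero(numbers):
--     """Sort-then-head: sort the nonzero elements ascending; the first one is the answer."""
--     if len(numbers) == 0:
--         raise Exception("ReducedExecTimes::min_function called on empty list")
--     nonzero = sorted(e for e in numbers if e != 0)
--     return nonzero[0] if nonzero else None
-- ===== Notes on version B (the rewrite author's own statement) =====
-- stated objective: alternative
-- what changed: A's single fused skip-zeros-and-track-minimum accumulator loop is replaced by sorting the nonzero elements ascending and taking the head of the sorted list (sort-then-head instead of a running-min scan).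
-- outside the precondition, e.g. on min_list_not_zero([]): A raises Exception, B raises Exception
import Mathlib
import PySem

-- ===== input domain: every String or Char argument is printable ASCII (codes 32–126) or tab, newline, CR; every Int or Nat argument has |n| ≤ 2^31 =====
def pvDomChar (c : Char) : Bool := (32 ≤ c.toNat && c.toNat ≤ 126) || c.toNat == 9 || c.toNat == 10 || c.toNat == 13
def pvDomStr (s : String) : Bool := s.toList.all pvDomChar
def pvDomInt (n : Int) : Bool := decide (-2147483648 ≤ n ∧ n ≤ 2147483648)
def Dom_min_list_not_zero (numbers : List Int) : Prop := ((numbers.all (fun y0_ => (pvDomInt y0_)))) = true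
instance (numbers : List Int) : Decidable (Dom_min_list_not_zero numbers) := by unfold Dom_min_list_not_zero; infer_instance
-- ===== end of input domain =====

-- B replaces A's fused skip-zeros/running-min accumulator loop with sort-then-head:
-- sort the nonzero elements ascending and return the first (objective: alternative algorithm).

-- ===== PORT A =====
-- the 'len(numbers) == 0: raise' guard is excluded by Pre_; past it, A is the accumulator loop
-- (one iteration of A's loop body, kept as a named helper)
def minStep (minimum : Option Int) (e : Int) : Option Int :=
  if e == 0 then minimum
  else match minimum with
    | none => some e
    | some m => if e < m then some e else some m

def min_list_not_zero (numbers : List Int) : Option Int :=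
  numbers.foldl minStep none

-- ===== PORT B =====
-- the same guard is excluded by Pre_; past it:
--   nonzero = sorted(e for e in numbers if e != 0); return nonzero[0] if nonzero else None
def min_list_not_zero_alt (numbers : List Int) : Option Int :=
  match PySem.List.sorted (numbers.filter (fun e => e != 0)) (fun x => x) with
  | [] => none
  | h :: _ => some h

-- ===== PRECONDITION & SPEC =====
-- A raises Exception on the empty list (and B keeps the same guard), so [] is excluded.
def Pre_min_list_not_zero (numbers : List Int) : Prop := numbers ≠ []
instance (numbers : List Int) : Decidable (Pre_min_list_not_zero numbers) := by
  unfold Pre_min_list_not_zero; infer_instance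
def pvWitness_min_list_not_zero : List Int := [0, 5, -3]

def Spec_min_list_not_zero (numbers : List Int) (out : Option Int) : Prop := out = min_list_not_zero_alt numbers
instance (numbers : List Int) (out : Option Int) : Decidable (Spec_min_list_not_zero numbers out) := by unfold Spec_min_list_not_zero; infer_instance

-- ===== CLAIM (what is proved, stated in full; the proofs are below) =====
def Claim_equal_min_list_not_zero : Prop := ∀ (numbers : List Int), Dom_min_list_not_zero numbers → Pre_min_list_not_zero numbers → Spec_min_list_not_zero numbers (min_list_not_zero numbers)

-- ===== LEMMAS AND PROOFS =====

theorem minStep_zero (m : Option Int) : minStep m 0 = m := by simp [minStep]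

theorem minStep_none {a : Int} (h : a ≠ 0) : minStep none a = some a := by
  simp [minStep, h]

theorem minStep_some {a : Int} (m : Int) (h : a ≠ 0) :
    minStep (some m) a = some (min m a) := by
  simp only [minStep, beq_iff_eq, if_neg h, Int.min_def]
  split_ifs <;> first | rfl | omega

-- once the accumulator is `some m`, A's loop is a running min over the nonzero elements
theorem foldl_some_eq (l : List Int) : ∀ (m : Int),
    l.foldl minStep (some m) = some ((l.filter (fun e => e != 0)).foldl min m) := by
  induction l with
  | nil => intro m; rfl
  | cons a l ih =>
    intro m
    by_cases ha : a = 0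
    · rw [List.foldl_cons, ha, minStep_zero, ih]
      simp
    · rw [List.foldl_cons, minStep_some m ha, ih]
      simp [ha]

-- A's whole loop is min? of the nonzero sublist
theorem foldl_none_eq (l : List Int) :
    l.foldl minStep none = PySem.List.min? (l.filter (fun e => e != 0)) (fun x => x) := by
  induction l with
  | nil => rfl
  | cons a l ih =>
    by_cases ha : a = 0
    · rw [List.foldl_cons, ha, minStep_zero, ih]
      simp
    · rw [List.foldl_cons, minStep_none ha, foldl_some_eq]
      have hf : (a :: l).filter (fun e => e != 0) = a :: l.filter (fun e => e != 0) := by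
        simp [ha]
      rw [hf, PySem.List.min?_id_cons]

-- the head of the ascending sort of any list is its min?
theorem head_sorted_eq_min? (l : List Int) :
    (match PySem.List.sorted l (fun x => x) with
     | [] => none
     | h :: _ => some h) = PySem.List.min? l (fun x => x) := by
  cases hs : PySem.List.sorted l (fun x => x) with
  | nil =>
    have hl : l = [] := (PySem.List.sorted_eq_nil_iff l (fun x => x) false).mp hs
    subst hl; rfl
  | cons h t =>
    have hl : l ≠ [] := by
      intro he; rw [he] at hs; simp [PySem.List.sorted] at hs
    have hmem : h ∈ l := by
      have : h ∈ PySem.List.sorted l (fun x => x) := by rw [hs]; exact List.mem_cons_self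
      exact (PySem.List.mem_sorted l (fun x => x) false h).mp this
    have hle : ∀ y ∈ l, h ≤ y := PySem.List.key_head_sorted_le l (fun x => x) hs
    cases hm : PySem.List.min? l (fun x => x) with
    | none => exact absurd ((PySem.List.min?_eq_none_iff l (fun x => x)).mp hm) hl
    | some m =>
      have hmmem : m ∈ l := PySem.List.min?_mem hm
      have hmin : ∀ y ∈ l, m ≤ y := PySem.List.min?_isMin hm
      have : h = m := le_antisymm (hle m hmmem) (hmin h hmem)
      simp [this]

-- ===== VERDICT (by name: the statement is the Claim_ definition above) =====
theorem min_list_not_zero_spec : Claim_equal_min_list_not_zero := by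
  intro numbers _ _
  unfold Spec_min_list_not_zero min_list_not_zero min_list_not_zero_alt
  rw [foldl_none_eq, head_sorted_eq_min?]
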